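-- pv_equiv track=rewrite | github.com/MrBrantCode/unitest_baseline | mut_generate/mist_train_cf/cf_47368/solution.py | find_isolated_ones
-- ===== SOURCE A (Python) =====
-- def find_isolated_ones(num):
--     # Convert the number to binary and remove the first two characters of the output of bin function
--     binNum = bin(num)[2:]
--     isolated_ones_indices = []
--
--     # Reverse the string because we are counting from right to left
--     reversedBinNum = binNum[::-1]
--
--     for i in range(len(reversedBinNum)):
--         # Ignore first and last bit
--         if i == 0 or i == len(reversedBinNum) - 1:
--             continue
--
--         # Checking if bit is '1' and it's adjacent bits are '0'
--         if reversedBinNum[i] == '1' and reversedBinNum[i-1] == '0' and reversedBinNum[i+1] == '0':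
--             isolated_ones_indices.append(i)
--
--     return isolated_ones_indices
-- ===== SOURCE B (Python) =====
-- def find_isolated_ones(num):
--     # Arithmetic bit scan: no string conversion. Walk the bits of abs(num)
--     # from the LSB upward, stopping before the top bit; an interior bit i
--     # is recorded when it is 1 and both neighbours are 0.
--     a = abs(num)
--     res = []
--     prev = a % 2
--     a //= 2
--     i = 0
--     while a > 1:
--         cur = a % 2
--         i += 1
--         if prev == 0 and cur == 1 and (a // 2) % 2 == 0:
--             res.append(i)
--         prev = cur
--         a //= 2
--     return res
-- ===== Notes on version B (the rewrite author's own statement) =====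
-- stated objective: alternative
-- what changed: B replaces A's string pipeline (bin(), slicing, reversing, indexed neighbour scan over characters) with a pure arithmetic scan of abs(num): it walks the bits by repeated //2, tracking the previous bit and peeking at the next, and stops before the top bit; no string is ever built.
import Mathlib
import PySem

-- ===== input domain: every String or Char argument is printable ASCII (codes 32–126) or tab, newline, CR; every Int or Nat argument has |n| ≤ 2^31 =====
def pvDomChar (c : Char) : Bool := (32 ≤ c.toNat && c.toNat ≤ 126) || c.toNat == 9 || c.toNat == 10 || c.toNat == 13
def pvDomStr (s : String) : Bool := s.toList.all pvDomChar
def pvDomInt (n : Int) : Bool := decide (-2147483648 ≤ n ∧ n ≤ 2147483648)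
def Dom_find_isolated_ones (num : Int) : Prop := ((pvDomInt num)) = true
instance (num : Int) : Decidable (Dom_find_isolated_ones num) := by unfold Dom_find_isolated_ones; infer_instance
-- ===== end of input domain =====

-- B replaces A's string pipeline (bin / slice / reverse / char neighbour scan) with an
-- arithmetic bit scan of |num|; the two agree on every Int (alternative, not faster).

-- ===== PORT A =====
-- bin(num)[2:] ported by hand (PySem has no bin): for n > 0 these are the binary digits
-- of n, MSB first — exactly Python's bin(n)[2:].
def pvBinDigits (n : Nat) : List Char :=
  if h : n = 0 then []
  else pvBinDigits (n / 2) ++ [if n % 2 = 1 then '1' else '0']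
termination_by n
decreasing_by exact Nat.div_lt_self (Nat.pos_of_ne_zero h) one_lt_two

def find_isolated_ones (num : Int) : List Int :=
  -- bin(num)[2:]: for num ≥ 0 the digits of num ('0' for 0); for num < 0 Python's
  -- '-0b…'[2:] keeps a leading 'b' before the digits of |num| — exact.
  let binNum : List Char :=
    (if num < 0 then ['b'] else []) ++
      (if num.natAbs = 0 then ['0'] else pvBinDigits num.natAbs)
  -- binNum[::-1]: List.reverse is exact for a full step -1 slice
  let reversedBinNum := binNum.reverse
  let L : Int := (reversedBinNum.length : Int)
  (PySem.List.pyRange 0 L 1).foldl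
    (fun acc i =>
      if i = 0 ∨ i = L - 1 then acc
      else if PySem.List.pyGetD reversedBinNum i ' ' = '1'
              ∧ PySem.List.pyGetD reversedBinNum (i - 1) ' ' = '0'
              ∧ PySem.List.pyGetD reversedBinNum (i + 1) ' ' = '0'
           then acc ++ [i] else acc) []

-- ===== PORT B =====
def pvAltLoop (a prev : Nat) (i : Int) (res : List Int) : List Int :=
  if h : 1 < a then
    let cur := a % 2
    let i' := i + 1
    let res' := if prev = 0 ∧ cur = 1 ∧ a / 2 % 2 = 0 then res ++ [i'] else res
    pvAltLoop (a / 2) cur i' res'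
  else res
termination_by a
decreasing_by exact Nat.div_lt_self (by omega) one_lt_two

def find_isolated_ones_alt (num : Int) : List Int :=
  let a := num.natAbs
  pvAltLoop (a / 2) (a % 2) 0 []

-- ===== PRECONDITION & SPEC =====
def Spec_find_isolated_ones (num : Int) (out : List Int) : Prop := out = find_isolated_ones_alt num
instance (num : Int) (out : List Int) : Decidable (Spec_find_isolated_ones num out) := by unfold Spec_find_isolated_ones; infer_instance

-- ===== CLAIM (what is proved, stated in full; the proofs are below) =====
def Claim_equal_find_isolated_ones : Prop := ∀ (num : Int), Dom_find_isolated_ones num → Spec_find_isolated_ones num (find_isolated_ones num)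

-- ===== LEMMAS AND PROOFS =====

/-- bit i of n (LSB = bit 0). -/
def pvBit (n i : Nat) : Nat := n / 2 ^ i % 2

/-- "bit i of n is 1 with 0 neighbours" — the isolation predicate both sides reduce to. -/
def pvP (n i : Nat) : Bool := (pvBit n i == 1) && (pvBit n (i - 1) == 0) && (pvBit n (i + 1) == 0)

/-- the binary digits of n, LSB first (= (pvBinDigits n).reverse). -/
def pvRev (n : Nat) : List Char :=
  if h : n = 0 then []
  else (if n % 2 = 1 then '1' else '0') :: pvRev (n / 2)
termination_by n
decreasing_by exact Nat.div_lt_self (Nat.pos_of_ne_zero h) one_lt_two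

lemma pvSize_succ (n : Nat) (h : n ≠ 0) : Nat.size n = Nat.size (n / 2) + 1 := by
  apply le_antisymm
  · apply Nat.size_le.mpr
    have h1 : n / 2 < 2 ^ Nat.size (n / 2) := Nat.lt_size_self (n / 2)
    have h2 : n < 2 ^ (Nat.size (n / 2)) * 2 := by omega
    calc n < 2 ^ (Nat.size (n / 2)) * 2 := h2
      _ = 2 ^ (Nat.size (n / 2) + 1) := (pow_succ 2 _).symm
  · show Nat.size (n / 2) < Nat.size n
    rw [Nat.lt_size]
    rcases Nat.eq_zero_or_pos (Nat.size (n / 2)) with hs | hs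
    · rw [hs]; omega
    · have h1 : Nat.size (n / 2) - 1 < Nat.size (n / 2) := by omega
      rw [Nat.lt_size] at h1
      have : 2 ^ Nat.size (n / 2) = 2 ^ (Nat.size (n / 2) - 1) * 2 := by
        rw [← pow_succ]; congr 1; omega
      omega

lemma pvBit_succ (n k : Nat) : pvBit n (k + 1) = pvBit (n / 2) k := by
  unfold pvBit
  rw [Nat.div_div_eq_div_mul, pow_succ, mul_comm]

lemma pvRev_eq_reverse (n : Nat) : (pvBinDigits n).reverse = pvRev n := by
  fun_induction pvRev n
  case case1 => simp [pvBinDigits]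
  case case2 => rename_i n h ih; rw [pvBinDigits, dif_neg h]; simp [ih]

lemma pvRev_length (n : Nat) : (pvRev n).length = Nat.size n := by
  fun_induction pvRev n
  case case1 => simp
  case case2 => rename_i n h ih; rw [pvSize_succ n h]; simp [ih]

lemma pvRev_getD (n : Nat) : ∀ i, i < Nat.size n →
    (pvRev n).getD i ' ' = (if pvBit n i = 1 then '1' else '0') := by
  fun_induction pvRev n
  case case1 => simp
  case case2 =>
    rename_i n h ih
    intro i hi
    match i with
    | 0 => simp [pvBit]
    | (j + 1) =>
      rw [pvSize_succ n h] at hi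
      simp only [List.getD_cons_succ]
      rw [ih j (by omega), pvBit_succ]

/-- main invariant of B's loop. -/
lemma pvAlt_spec (n : Nat) : ∀ d k res, Nat.size n - (k + 2) = d →
    pvAltLoop (n / 2 ^ (k + 1)) (pvBit n k) (k : Int) res
      = res ++ ((List.range' (k + 1) d).filter (pvP n)).map (fun i => (i : Int)) := by
  intro d
  induction d with
  | zero =>
    intro k res hd
    rw [pvAltLoop]
    have h1 : n < 2 ^ (k + 2) := Nat.size_le.mp (by omega)
    have hle : ¬ 1 < n / 2 ^ (k + 1) := by
      have h2 : n / 2 ^ (k + 1) < 2 := by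
        rw [Nat.div_lt_iff_lt_mul (by positivity)]
        calc n < 2 ^ (k + 2) := h1
          _ = 2 * 2 ^ (k + 1) := by ring
      omega
    simp [hle]
  | succ d ih =>
    intro k res hd
    have hlt : 2 ^ (k + 2) ≤ n := Nat.lt_size.mp (by omega)
    have ha : 1 < n / 2 ^ (k + 1) := by
      have : 2 ≤ n / 2 ^ (k + 1) := by
        rw [Nat.le_div_iff_mul_le (by positivity)]
        calc 2 * 2 ^ (k + 1) = 2 ^ (k + 2) := by ring
          _ ≤ n := hlt
      omega
    rw [pvAltLoop, dif_pos ha]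
    have hdiv : n / 2 ^ (k + 1) / 2 = n / 2 ^ (k + 2) := by
      rw [Nat.div_div_eq_div_mul, ← pow_succ]
    have hcur : n / 2 ^ (k + 1) % 2 = pvBit n (k + 1) := rfl
    have hnext : n / 2 ^ (k + 2) % 2 = pvBit n (k + 2) := rfl
    simp only [hcur, hdiv, hnext]
    rw [show ((k : Nat) : Int) + 1 = (((k + 1 : Nat) : Int)) by push_cast; ring]
    have hrec := ih (k + 1)
      (if pvBit n k = 0 ∧ pvBit n (k + 1) = 1 ∧ pvBit n (k + 2) = 0
        then res ++ [(((k + 1 : Nat) : Int))] else res) (by omega)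
    rw [show n / 2 ^ (k + 1 + 1) = n / 2 ^ (k + 2) from rfl] at hrec
    rw [hrec, List.range'_succ]
    have hiff : pvP n (k + 1) = true ↔ (pvBit n k = 0 ∧ pvBit n (k + 1) = 1 ∧ pvBit n (k + 2) = 0) := by
      unfold pvP
      simp only [Nat.add_sub_cancel, Bool.and_eq_true, beq_iff_eq]
      tauto
    by_cases hc : pvBit n k = 0 ∧ pvBit n (k + 1) = 1 ∧ pvBit n (k + 2) = 0
    · have hp : pvP n (k + 1) = true := hiff.mpr hc
      simp [hc, hp]
    · have hp : pvP n (k + 1) = false := by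
        rw [Bool.eq_false_iff]
        exact fun h => hc (hiff.mp h)
      simp [hc, hp]

lemma B_eq (num : Int) :
    find_isolated_ones_alt num
      = ((List.range' 1 (Nat.size num.natAbs - 2)).filter (pvP num.natAbs)).map (fun i => (i : Int)) := by
  unfold find_isolated_ones_alt
  have h := pvAlt_spec num.natAbs (Nat.size num.natAbs - 2) 0 [] (by omega)
  have h0 : pvBit num.natAbs 0 = num.natAbs % 2 := by simp [pvBit]
  have h1 : num.natAbs / 2 ^ (0 + 1) = num.natAbs / 2 := by norm_num
  rw [h0, h1] at h
  simpa using h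

/-- bits are 0 or 1. -/
lemma pvBit_lt_two (n j : Nat) : pvBit n j < 2 := Nat.mod_lt _ (by norm_num)

/-- the character test of A at an in-digit position is the bit test. -/
lemma pvQ_char (n k : Nat) (revB : List Char) (hpre : ∀ j, j < Nat.size n → revB.getD j ' ' = (if pvBit n j = 1 then '1' else '0'))
    (hk1 : 1 ≤ k) (hk2 : k + 1 < Nat.size n) :
    ((revB.getD k ' ' == '1') && (revB.getD (k - 1) ' ' == '0') && (revB.getD (k + 1) ' ' == '0')) = pvP n k := by
  rw [hpre k (by omega), hpre (k - 1) (by omega), hpre (k + 1) (by omega)]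
  unfold pvP
  have h1 := pvBit_lt_two n k
  have h2 := pvBit_lt_two n (k - 1)
  have h3 := pvBit_lt_two n (k + 1)
  rcases (by omega : pvBit n k = 0 ∨ pvBit n k = 1) with hb1 | hb1 <;>
    rcases (by omega : pvBit n (k - 1) = 0 ∨ pvBit n (k - 1) = 1) with hb2 | hb2 <;>
      rcases (by omega : pvBit n (k + 1) = 0 ∨ pvBit n (k + 1) = 1) with hb3 | hb3 <;>
        simp [hb1, hb2, hb3]

/-- A's scan over pvRev n ++ t (t = [] for num ≥ 0, ['b'] for num < 0) is the filtered range. -/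
lemma A_core (n : Nat) (hn : n ≠ 0) (t : List Char) (ht : t = [] ∨ t = ['b']) :
    (PySem.List.pyRange 0 (((pvRev n ++ t).length : Nat) : Int) 1).foldl
      (fun acc i =>
        if i = 0 ∨ i = (((pvRev n ++ t).length : Nat) : Int) - 1 then acc
        else if PySem.List.pyGetD (pvRev n ++ t) i ' ' = '1'
                ∧ PySem.List.pyGetD (pvRev n ++ t) (i - 1) ' ' = '0'
                ∧ PySem.List.pyGetD (pvRev n ++ t) (i + 1) ' ' = '0'
             then acc ++ [i] else acc) []
    = ((List.range' 1 (Nat.size n - 2)).filter (pvP n)).map (fun i => (i : Int)) := by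
  have hs1 : 1 ≤ Nat.size n := Nat.size_pos.mpr (Nat.pos_of_ne_zero hn)
  have hsrev : (pvRev n).length = Nat.size n := pvRev_length n
  have htlen : t.length ≤ 1 := by rcases ht with h | h <;> simp [h]
  have hlen : (pvRev n ++ t).length = Nat.size n + t.length := by simp [hsrev]
  set revB := pvRev n ++ t with hrevB
  set len := revB.length with hlendef
  set Q : Nat → Bool := fun k =>
    (decide (k ≠ 0) && decide (k ≠ len - 1)) &&
      ((revB.getD k ' ' == '1') && (revB.getD (k - 1) ' ' == '0') && (revB.getD (k + 1) ' ' == '0')) with hQ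
  rw [PySem.List.pyRange_zero_nat len, List.foldl_map]
  rw [PySem.List.foldl_congr_mem (List.range len) _
      (fun acc k => if Q k then acc ++ [(k : Int)] else acc) [] ?hpt]
  case hpt =>
    intro acc k hk
    rw [List.mem_range] at hk
    by_cases hk0 : k = 0
    · subst hk0
      simp [hQ]
    · by_cases hk1 : k = len - 1
      · have h1 : ((k : Nat) : Int) = ((len : Nat) : Int) - 1 := by omega
        have h2 : Q k = false := by simp [hQ, hk1]
        simp [h1, h2]
      · have hskip : ¬ (((k : Nat) : Int) = 0 ∨ ((k : Nat) : Int) = ((len : Nat) : Int) - 1) := by omega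
        rw [if_neg hskip]
        have e2 : ((k : Nat) : Int) - 1 = (((k - 1 : Nat)) : Int) := by omega
        have e3 : ((k : Nat) : Int) + 1 = (((k + 1 : Nat)) : Int) := by omega
        rw [e2, e3, PySem.List.pyGetD_natCast, PySem.List.pyGetD_natCast, PySem.List.pyGetD_natCast]
        have hiff : (revB.getD k ' ' = '1' ∧ revB.getD (k - 1) ' ' = '0' ∧ revB.getD (k + 1) ' ' = '0')
            ↔ Q k = true := by
          simp [hQ, hk0, hk1, and_assoc]
        rw [if_congr hiff rfl rfl]
  rw [PySem.List.foldl_append_if Q (fun k => ((k : Nat) : Int)) (List.range len) []]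
  rw [List.nil_append]
  have hcong : ∀ k ∈ List.range' 1 (Nat.size n - 2), Q k = pvP n k := by
    intro k hk
    rw [List.mem_range'] at hk
    obtain ⟨i, hi, rfl⟩ := hk
    have hk1 : 1 ≤ 1 + 1 * i := by omega
    have hk2 : 1 + 1 * i + 1 < Nat.size n := by omega
    have hq1 : decide (1 + 1 * i ≠ 0) = true := by simp
    have hq2 : decide (1 + 1 * i ≠ len - 1) = true := by
      simp only [decide_eq_true_eq]
      omega
    have hpre : ∀ j, j < Nat.size n → revB.getD j ' ' = (if pvBit n j = 1 then '1' else '0') := by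
      intro j hj
      rw [hrevB, List.getD_append _ _ _ _ (by omega)]
      exact pvRev_getD n j hj
    rw [hQ]
    simp only [hq1, hq2, Bool.true_and]
    exact pvQ_char n (1 + 1 * i) revB hpre hk1 hk2
  have hQ0 : Q 0 = false := by simp [hQ]
  have hQtop : Q (len - 1) = false := by simp [hQ]
  have hdrop : (List.range len).filter Q = (List.range' 1 (Nat.size n - 2)).filter Q := by
    rcases ht with ht' | ht' <;> subst ht'
    · -- t = [] : len = size n
      have hl : len = Nat.size n := by simpa using hlen
      rcases Nat.lt_or_ge (Nat.size n) 2 with h2 | h2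
      · have hs : Nat.size n = 1 := by omega
        rw [hl, hs]
        simp [List.range_succ, hQ0]
      · rw [List.range_eq_range', hl,
            show Nat.size n = (Nat.size n - 1) + 1 from by omega, List.range'_succ,
            show Nat.size n - 1 = (Nat.size n - 2) + 1 from by omega, List.range'_concat]
        have h0 : Q 0 = false := hQ0
        have htop : Q (1 + 1 * (Nat.size n - 2)) = false := by
          have : 1 + 1 * (Nat.size n - 2) = len - 1 := by omega
          rw [this]; exact hQtop
        simp only [Nat.one_mul] at htop
        simp [List.filter_append, h0, htop]
    · -- t = ['b'] : len = size n + 1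
      have hl : len = Nat.size n + 1 := by simpa using hlen
      rw [List.range_eq_range', hl, List.range'_succ,
          show Nat.size n = (Nat.size n - 1) + 1 from by omega, List.range'_concat]
      have htop : Q (1 + 1 * (Nat.size n - 1)) = false := by
        have : 1 + 1 * (Nat.size n - 1) = len - 1 := by omega
        rw [this]; exact hQtop
      rcases Nat.lt_or_ge (Nat.size n) 2 with h2 | h2
      · have hs : Nat.size n - 1 = 0 := by omega
        have hQ1 : Q (1 + 1 * (Nat.size n - 1)) = false := htop
        rw [hs] at hQ1
        rw [hs]
        simp only [Nat.mul_zero, Nat.add_zero] at hQ1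
        simp [hQ0, hQ1]
      · rw [show Nat.size n - 1 = (Nat.size n - 2) + 1 from by omega, List.range'_concat]
        have htop2 : Q (1 + (Nat.size n - 2 + 1)) = false := by
          have e : 1 + (Nat.size n - 2 + 1) = len - 1 := by omega
          rw [e]; exact hQtop
        have hmid : Q (1 + 1 * (Nat.size n - 2)) = false := by
          have hix : revB.getD (1 + 1 * (Nat.size n - 2) + 1) ' ' = 'b' := by
            rw [hrevB, List.getD_append_right _ _ _ _ (by omega)]
            have h0 : 1 + 1 * (Nat.size n - 2) + 1 - (pvRev n).length = 0 := by omega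
            rw [h0]
            simp [List.getD]
          simp only [hQ]
          rw [hix]
          simp
        simp only [Nat.one_mul] at htop hmid
        simp [List.filter_append, hQ0, htop2, hmid]
  rw [hdrop, List.filter_congr hcong]
  simp
  exact List.map_eq_flatMap

lemma A_eq (num : Int) :
    find_isolated_ones num
      = ((List.range' 1 (Nat.size num.natAbs - 2)).filter (pvP num.natAbs)).map (fun i => (i : Int)) := by
  by_cases h0 : num.natAbs = 0
  · have hz : num = 0 := Int.natAbs_eq_zero.mp h0
    subst hz
    norm_num [find_isolated_ones, PySem.List.pyRange_zero, List.range_succ]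
  · by_cases hneg : num < 0
    · unfold find_isolated_ones
      simp only [if_pos hneg, if_neg h0]
      rw [List.reverse_append, pvRev_eq_reverse]
      rw [show (['b'] : List Char).reverse = ['b'] from rfl]
      exact A_core num.natAbs h0 ['b'] (Or.inr rfl)
    · unfold find_isolated_ones
      simp only [if_neg hneg, if_neg h0, List.nil_append]
      rw [pvRev_eq_reverse]
      rw [show pvRev num.natAbs = pvRev num.natAbs ++ [] from (List.append_nil _).symm]
      exact A_core num.natAbs h0 [] (Or.inl rfl)

-- ===== VERDICT (by name: the statement is the Claim_ definition above) =====
theorem find_isolated_ones_spec : Claim_equal_find_isolated_ones := by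
  intro num _
  unfold Spec_find_isolated_ones
  rw [A_eq, B_eq]
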